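-- pv_equiv track=rewrite | github.com/Adityaadpandey/Nova-Readme-Maker | project_knowledge.py | _determine_service_purpose
-- ===== SOURCE A (Python) =====
-- def _determine_service_purpose(name: str, image: str) -> str:
--     """Determine the purpose of a Docker service."""
--     name_lower = name.lower()
--     image_lower = image.lower() if image else ''
--
--     # Database services
--     if any(db in name_lower or db in image_lower for db in ['postgres', 'postgresql']):
--         return 'PostgreSQL database for persistent data storage'
--     if any(db in name_lower or db in image_lower for db in ['mysql', 'mariadb']):
--         return 'MySQL/MariaDB database for persistent data storage'
--     if 'mongo' in name_lower or 'mongo' in image_lower: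
--         return 'MongoDB NoSQL database'
--     if 'redis' in name_lower or 'redis' in image_lower:
--         return 'Redis in-memory cache and message broker'
--     if 'elastic' in name_lower or 'elastic' in image_lower:
--         return 'Elasticsearch for search and analytics'
--
--     # Message queues
--     if 'rabbit' in name_lower or 'rabbit' in image_lower:
--         return 'RabbitMQ message broker'
--     if 'kafka' in name_lower or 'kafka' in image_lower:
--         return 'Apache Kafka event streaming'
--
--     # Web servers
--     if 'nginx' in name_lower or 'nginx' in image_lower:
--         return 'Nginx web server/reverse proxy'
--     if 'traefik' in name_lower or 'traefik' in image_lower: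
--         return 'Traefik reverse proxy and load balancer'
--
--     # Application services
--     if any(app in name_lower for app in ['app', 'api', 'web', 'backend', 'server']):
--         return 'Main application service'
--     if 'frontend' in name_lower or 'client' in name_lower:
--         return 'Frontend web application'
--     if 'worker' in name_lower or 'celery' in name_lower:
--         return 'Background task worker'
--
--     return 'Application service'
-- ===== SOURCE B (Python) =====
-- # B: single full pass over a flat keyword index, aggregating the minimal rule
-- # priority that matched (no early-exit cascade); the priority indexes the answer.
-- _KEYWORDS = [
--     ('postgres', True, 0), ('postgresql', True, 0),
--     ('mysql', True, 1), ('mariadb', True, 1),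
--     ('mongo', True, 2),
--     ('redis', True, 3),
--     ('elastic', True, 4),
--     ('rabbit', True, 5),
--     ('kafka', True, 6),
--     ('nginx', True, 7),
--     ('traefik', True, 8),
--     ('app', False, 9), ('api', False, 9), ('web', False, 9),
--     ('backend', False, 9), ('server', False, 9),
--     ('frontend', False, 10), ('client', False, 10),
--     ('worker', False, 11), ('celery', False, 11),
-- ]
--
-- _PURPOSES = [
--     'PostgreSQL database for persistent data storage',
--     'MySQL/MariaDB database for persistent data storage',
--     'MongoDB NoSQL database',
--     'Redis in-memory cache and message broker',
--     'Elasticsearch for search and analytics',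
--     'RabbitMQ message broker',
--     'Apache Kafka event streaming',
--     'Nginx web server/reverse proxy',
--     'Traefik reverse proxy and load balancer',
--     'Main application service',
--     'Frontend web application',
--     'Background task worker',
--     'Application service',
-- ]
--
-- def _determine_service_purpose(name: str, image: str) -> str:
--     nl = name.lower()
--     il = image.lower() if image else ''
--     best = 12
--     for kw, in_image, prio in _KEYWORDS:
--         if kw in nl or (in_image and kw in il):
--             best = min(best, prio)
--     return _PURPOSES[best]
-- ===== Notes on version B (the rewrite author's own statement) =====
-- stated objective: alternative
-- what changed: Replaced the early-exit if-cascade by a single full pass over a flat keyword index that aggregates the minimal matching rule priority, then indexes a purposes table with it (equivalent because priorities are in cascade order).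
import Mathlib
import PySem

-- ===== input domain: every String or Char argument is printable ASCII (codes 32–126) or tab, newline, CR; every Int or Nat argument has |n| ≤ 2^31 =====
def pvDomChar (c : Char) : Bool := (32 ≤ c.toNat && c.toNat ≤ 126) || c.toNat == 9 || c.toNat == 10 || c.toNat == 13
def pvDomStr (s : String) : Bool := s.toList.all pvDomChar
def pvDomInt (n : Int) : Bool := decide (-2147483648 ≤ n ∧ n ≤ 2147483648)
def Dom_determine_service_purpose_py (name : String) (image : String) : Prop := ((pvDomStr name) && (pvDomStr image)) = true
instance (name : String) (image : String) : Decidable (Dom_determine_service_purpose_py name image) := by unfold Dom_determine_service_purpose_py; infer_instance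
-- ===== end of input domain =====

-- B replaces the early-exit if-cascade by one full pass over a flat keyword index that
-- aggregates the minimal matching rule priority (objective: alternative); same return value.

-- ===== PORT A =====
def determine_service_purpose_py (name : String) (image : String) : String :=
  let name_lower := PySem.Str.lower name
  let image_lower := if image ≠ "" then PySem.Str.lower image else ""
  if (["postgres", "postgresql"] : List String).any
      (fun db => PySem.Str.isIn db name_lower || PySem.Str.isIn db image_lower) then
    "PostgreSQL database for persistent data storage"
  else if (["mysql", "mariadb"] : List String).any
      (fun db => PySem.Str.isIn db name_lower || PySem.Str.isIn db image_lower) then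
    "MySQL/MariaDB database for persistent data storage"
  else if PySem.Str.isIn "mongo" name_lower || PySem.Str.isIn "mongo" image_lower then
    "MongoDB NoSQL database"
  else if PySem.Str.isIn "redis" name_lower || PySem.Str.isIn "redis" image_lower then
    "Redis in-memory cache and message broker"
  else if PySem.Str.isIn "elastic" name_lower || PySem.Str.isIn "elastic" image_lower then
    "Elasticsearch for search and analytics"
  else if PySem.Str.isIn "rabbit" name_lower || PySem.Str.isIn "rabbit" image_lower then
    "RabbitMQ message broker"
  else if PySem.Str.isIn "kafka" name_lower || PySem.Str.isIn "kafka" image_lower then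
    "Apache Kafka event streaming"
  else if PySem.Str.isIn "nginx" name_lower || PySem.Str.isIn "nginx" image_lower then
    "Nginx web server/reverse proxy"
  else if PySem.Str.isIn "traefik" name_lower || PySem.Str.isIn "traefik" image_lower then
    "Traefik reverse proxy and load balancer"
  else if (["app", "api", "web", "backend", "server"] : List String).any
      (fun app => PySem.Str.isIn app name_lower) then
    "Main application service"
  else if PySem.Str.isIn "frontend" name_lower || PySem.Str.isIn "client" name_lower then
    "Frontend web application"
  else if PySem.Str.isIn "worker" name_lower || PySem.Str.isIn "celery" name_lower then
    "Background task worker"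
  else
    "Application service"

-- ===== PORT B =====
-- the module-level flat keyword index _KEYWORDS of Source B: (keyword, also-check-image, priority)
def pvKeywords : List (String × Bool × Nat) :=
  [ ("postgres", true, 0), ("postgresql", true, 0),
    ("mysql", true, 1), ("mariadb", true, 1),
    ("mongo", true, 2),
    ("redis", true, 3),
    ("elastic", true, 4),
    ("rabbit", true, 5),
    ("kafka", true, 6),
    ("nginx", true, 7),
    ("traefik", true, 8),
    ("app", false, 9), ("api", false, 9), ("web", false, 9),
    ("backend", false, 9), ("server", false, 9),
    ("frontend", false, 10), ("client", false, 10),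
    ("worker", false, 11), ("celery", false, 11) ]

-- the module-level table _PURPOSES of Source B
def pvPurposes : List String :=
  [ "PostgreSQL database for persistent data storage",
    "MySQL/MariaDB database for persistent data storage",
    "MongoDB NoSQL database",
    "Redis in-memory cache and message broker",
    "Elasticsearch for search and analytics",
    "RabbitMQ message broker",
    "Apache Kafka event streaming",
    "Nginx web server/reverse proxy",
    "Traefik reverse proxy and load balancer",
    "Main application service",
    "Frontend web application",
    "Background task worker",
    "Application service" ]

def determine_service_purpose_py_alt (name : String) (image : String) : String :=
  let nl := PySem.Str.lower name
  let il := if image ≠ "" then PySem.Str.lower image else ""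
  let best := pvKeywords.foldl
    (fun best kw =>
      if PySem.Str.isIn kw.1 nl || (kw.2.1 && PySem.Str.isIn kw.1 il) then min best kw.2.2
      else best) 12
  pvPurposes.getD best "Application service"  -- _PURPOSES[best]; best ≤ 12 < 13 always in range

-- ===== PRECONDITION & SPEC =====
def Spec_determine_service_purpose_py (name : String) (image : String) (out : String) : Prop := out = determine_service_purpose_py_alt name image
instance (name : String) (image : String) (out : String) : Decidable (Spec_determine_service_purpose_py name image out) := by unfold Spec_determine_service_purpose_py; infer_instance

-- ===== CLAIM (what is proved, stated in full; the proofs are below) =====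
def Claim_equal_determine_service_purpose_py : Prop := ∀ (name : String) (image : String), Dom_determine_service_purpose_py name image → Spec_determine_service_purpose_py name image (determine_service_purpose_py name image)

-- ===== LEMMAS AND PROOFS =====

-- proof-side "first match" cascade over a keyword list
def pvFirst (c : (String × Bool × Nat) → Bool) : List (String × Bool × Nat) → Nat → Nat
  | [], acc => acc
  | x :: l, acc => if c x then x.2.2 else pvFirst c l acc

-- once the accumulator is ≤ every remaining priority, the fold keeps it unchanged
theorem pv_foldl_min_stay (c : (String × Bool × Nat) → Bool) (l : List (String × Bool × Nat))
    (acc : Nat) (h : ∀ x ∈ l, acc ≤ x.2.2) :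
    l.foldl (fun b x => if c x then min b x.2.2 else b) acc = acc := by
  induction l with
  | nil => rfl
  | cons x l ih =>
      simp only [List.foldl_cons]
      have hx : acc ≤ x.2.2 := h x (List.mem_cons_self ..)
      have : (if c x then min acc x.2.2 else acc) = acc := by
        split_ifs <;> omega
      rw [this]
      exact ih (fun y hy => h y (List.mem_cons_of_mem _ hy))

-- on a priority-sorted list with all priorities ≤ acc, the min-fold equals the first match
theorem pv_foldl_min_eq_first (c : (String × Bool × Nat) → Bool) (l : List (String × Bool × Nat))
    (acc : Nat) (hs : List.Pairwise (fun x y => x.2.2 ≤ y.2.2) l) (ha : ∀ x ∈ l, x.2.2 ≤ acc) :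
    l.foldl (fun b x => if c x then min b x.2.2 else b) acc = pvFirst c l acc := by
  induction l generalizing acc with
  | nil => rfl
  | cons x l ih =>
      rcases List.pairwise_cons.mp hs with ⟨hx, hs'⟩
      simp only [List.foldl_cons, pvFirst]
      by_cases hc : c x
      · simp only [hc, if_true]
        have hxle : x.2.2 ≤ acc := ha x (List.mem_cons_self ..)
        have : min acc x.2.2 = x.2.2 := by omega
        rw [this]
        exact pv_foldl_min_stay c l x.2.2 hx
      · simp only [hc]
        exact ih acc hs' (fun y hy => ha y (List.mem_cons_of_mem _ hy))

-- B's fold over the literal keyword table equals the first-match cascade pvFirst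
theorem pv_alt_char (nl il : String) :
    List.foldl
      (fun best kw =>
        if PySem.Str.isIn kw.1 nl || (kw.2.1 && PySem.Str.isIn kw.1 il) then min best kw.2.2
        else best) 12 pvKeywords
      = pvFirst (fun kw => PySem.Str.isIn kw.1 nl || (kw.2.1 && PySem.Str.isIn kw.1 il)) pvKeywords 12 :=
  pv_foldl_min_eq_first _ _ _ (by decide) (by decide)

-- splitting a boolean 'or' condition into two nested ifs
theorem pv_ite_or {α : Type} (a b : Bool) (x y : α) :
    (if (a || b) = true then x else y) = if a = true then x else if b = true then x else y := by
  cases a <;> simp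

-- pushing the table lookup through an if on the index
theorem pv_getD_ite (c : Prop) [Decidable c] (a b : Nat) :
    pvPurposes.getD (if c then a else b) "Application service" =
      if c then pvPurposes.getD a "Application service"
      else pvPurposes.getD b "Application service" := by
  split_ifs <;> rfl

-- ===== VERDICT (by name: the statement is the Claim_ definition above) =====
set_option maxHeartbeats 4000000 in
theorem determine_service_purpose_py_spec : Claim_equal_determine_service_purpose_py := by
  intro name image _
  unfold Spec_determine_service_purpose_py determine_service_purpose_py determine_service_purpose_py_alt
  simp only [pv_alt_char]
  simp only [pvKeywords, pvFirst, List.any_cons, List.any_nil, Bool.or_false,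
    Bool.true_and, Bool.false_and, pv_ite_or, pv_getD_ite]
  rfl
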